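-- pv_equiv track=rewrite | github.com/purekim333/TIL | codingTest/1954달팽이/1954.py | make_delta
-- ===== SOURCE A (Python) =====
-- def make_delta(dx, dy, N) :
--     direction_x = [dx[0]] * (N-1)
--     direction_y = [dy[0]] * (N-1)
--
--     count = 0
--     for k in range(1, N) :
--
--         direction_x += [dx[(k + count)%4]] * (N-k)            #dx[1] dx[2] dx[3] dx[0] dx[1] dx[2] dx[3] dx[2] dx[3]
--         direction_x += [dx[(k + count +1)%4 ]] * (N-k)      #dx[2] dx[3] dx[4]
--
--         direction_y += [dy[(k+count)%4]] * (N-k)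
--         direction_y += [dy[(k+count+1)%4]] * (N-k)
--
--         count += 1
--     return direction_x, direction_y
-- ===== SOURCE B (Python) =====
-- def make_delta(dx, dy, N):
--     # Per-step state machine: walk the N*N-1 spiral steps once, tracking
--     # the current direction index j and the steps remaining in the run.
--     xs, ys = [], []
--     if N >= 1:
--         j, rem = 0, N - 1
--         for _ in range(N * N - 1):
--             if rem == 0:
--                 j += 1
--                 rem = N - (j + 1) // 2
--             xs.append(dx[j % 4])
--             ys.append(dy[j % 4])
--             rem -= 1
--     return xs, ys
-- ===== Notes on version B (the rewrite author's own statement) =====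
-- stated objective: alternative
-- what changed: B replaces A's run-expansion (list-repeat blocks appended per loop iteration with an interleaved counter) by a per-step state machine: it walks the N*N-1 spiral steps one at a time, tracking the current direction index and a countdown of steps remaining in the run, appending one element per step.
import Mathlib
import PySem

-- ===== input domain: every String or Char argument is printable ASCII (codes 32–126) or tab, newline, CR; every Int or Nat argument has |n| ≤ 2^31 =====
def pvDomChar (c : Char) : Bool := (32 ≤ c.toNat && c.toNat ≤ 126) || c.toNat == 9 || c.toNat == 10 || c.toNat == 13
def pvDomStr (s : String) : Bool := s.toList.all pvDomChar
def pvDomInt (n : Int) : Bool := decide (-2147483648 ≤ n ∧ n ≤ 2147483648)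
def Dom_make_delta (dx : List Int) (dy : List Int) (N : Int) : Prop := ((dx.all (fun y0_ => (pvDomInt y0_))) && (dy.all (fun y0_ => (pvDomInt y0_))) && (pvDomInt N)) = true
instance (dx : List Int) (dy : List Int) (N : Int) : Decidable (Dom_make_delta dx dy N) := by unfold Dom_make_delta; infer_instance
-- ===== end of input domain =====

-- B replaces A's per-run list-repeat appends by a per-step state machine over the N*N-1 spiral steps; objective: alternative (same cost, different algorithm).


-- ===== PORT A =====
def make_delta (dx : List Int) (dy : List Int) (N : Int) : List Int × List Int :=
  let direction_x := PySem.List.pyRepeat [PySem.List.pyGetD dx 0 0] (N - 1)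
  let direction_y := PySem.List.pyRepeat [PySem.List.pyGetD dy 0 0] (N - 1)
  let st := (PySem.List.pyRange 1 N 1).foldl
    (fun (st : List Int × List Int × Int) (k : Int) =>
      let dirx := st.1
      let diry := st.2.1
      let count := st.2.2
      let dirx := dirx ++ PySem.List.pyRepeat [PySem.List.pyGetD dx (PySem.Int.mod (k + count) 4) 0] (N - k)
      let dirx := dirx ++ PySem.List.pyRepeat [PySem.List.pyGetD dx (PySem.Int.mod (k + count + 1) 4) 0] (N - k)
      let diry := diry ++ PySem.List.pyRepeat [PySem.List.pyGetD dy (PySem.Int.mod (k + count) 4) 0] (N - k)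
      let diry := diry ++ PySem.List.pyRepeat [PySem.List.pyGetD dy (PySem.Int.mod (k + count + 1) 4) 0] (N - k)
      (dirx, diry, count + 1))
    (direction_x, direction_y, 0)
  (st.1, st.2.1)

-- ===== PORT B =====
-- one step of B's state machine: state = (xs, ys, direction index j, steps left in run)
def pvStep (dx : List Int) (dy : List Int) (N : Int) (st : List Int × List Int × Int × Int) :
    List Int × List Int × Int × Int :=
  let jr := if st.2.2.2 = 0 then (st.2.2.1 + 1, N - PySem.Int.floordiv (st.2.2.1 + 1 + 1) 2)
            else (st.2.2.1, st.2.2.2)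
  (st.1 ++ [PySem.List.pyGetD dx (PySem.Int.mod jr.1 4) 0],
   st.2.1 ++ [PySem.List.pyGetD dy (PySem.Int.mod jr.1 4) 0], jr.1, jr.2 - 1)

def make_delta_alt (dx : List Int) (dy : List Int) (N : Int) : List Int × List Int :=
  if 1 ≤ N then
    let st := (PySem.List.pyRange 0 (N * N - 1) 1).foldl
      (fun st _ => pvStep dx dy N st) ([], [], 0, N - 1)
    (st.1, st.2.1)
  else ([], [])

-- ===== PRECONDITION & SPEC =====
-- Pre_ excludes exactly the inputs where A raises IndexError: empty dx/dy (dx[0]/dy[0]),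
-- or N ≥ 2 with dx/dy shorter than the %4 indices the loop reaches (3 for N = 2, 4 for N ≥ 3).
def Pre_make_delta (dx : List Int) (dy : List Int) (N : Int) : Prop :=
  0 < dx.length ∧ 0 < dy.length ∧
  (N = 2 → 3 ≤ dx.length ∧ 3 ≤ dy.length) ∧
  (3 ≤ N → 4 ≤ dx.length ∧ 4 ≤ dy.length)
instance (dx : List Int) (dy : List Int) (N : Int) : Decidable (Pre_make_delta dx dy N) := by unfold Pre_make_delta; infer_instance
def pvWitness_make_delta : List Int × List Int × Int := ([1, 0, -1, 0], [0, 1, 0, -1], 4)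

def Spec_make_delta (dx : List Int) (dy : List Int) (N : Int) (out : List Int × List Int) : Prop := out = make_delta_alt dx dy N
instance (dx : List Int) (dy : List Int) (N : Int) (out : List Int × List Int) : Decidable (Spec_make_delta dx dy N out) := by unfold Spec_make_delta; infer_instance

-- ===== CLAIM (what is proved, stated in full; the proofs are below) =====
def Claim_equal_make_delta : Prop := ∀ (dx : List Int) (dy : List Int) (N : Int), Dom_make_delta dx dy N → Pre_make_delta dx dy N → Spec_make_delta dx dy N (make_delta dx dy N)

-- ===== LEMMAS AND PROOFS =====

-- one run expanded for axis xs
def pvRep (xs : List Int) (i n : Int) : List Int :=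
  List.replicate n.toNat (PySem.List.pyGetD xs i 0)

-- the loop elements c+1, …, c+m
def pvIdx (c : Int) (m : Nat) : List Int :=
  (List.range m).map (fun i : Nat => c + 1 + (i : Int))

-- the spiral segment for those elements, with the closed indices (2k-1)%4, (2k)%4
def pvSeg (xs : List Int) (N : Int) (c : Int) (m : Nat) : List Int :=
  (pvIdx c m).flatMap
    (fun k => pvRep xs (PySem.Int.mod (2 * k - 1) 4) (N - k) ++ pvRep xs (PySem.Int.mod (2 * k) 4) (N - k))

lemma pvIdx_succ (c : Int) (m : Nat) : pvIdx c (m + 1) = pvIdx c m ++ [c + 1 + (m : Int)] := by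
  simp [pvIdx, List.range_succ]

lemma pvIdx_cons (c : Int) (m : Nat) : pvIdx c (m + 1) = (c + 1) :: pvIdx (c + 1) m := by
  simp [pvIdx, List.range_succ_eq_map, Function.comp_def]
  intro a _
  ring

-- A's fold over the consecutive block c+1, …, c+m with counter starting at c
lemma pvFoldA (dx dy : List Int) (N : Int) (m : Nat) :
    ∀ (c : Int) (x y : List Int),
      ((pvIdx c m).foldl
        (fun (st : List Int × List Int × Int) (k : Int) =>
          let dirx := st.1
          let diry := st.2.1
          let count := st.2.2
          let dirx := dirx ++ PySem.List.pyRepeat [PySem.List.pyGetD dx (PySem.Int.mod (k + count) 4) 0] (N - k)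
          let dirx := dirx ++ PySem.List.pyRepeat [PySem.List.pyGetD dx (PySem.Int.mod (k + count + 1) 4) 0] (N - k)
          let diry := diry ++ PySem.List.pyRepeat [PySem.List.pyGetD dy (PySem.Int.mod (k + count) 4) 0] (N - k)
          let diry := diry ++ PySem.List.pyRepeat [PySem.List.pyGetD dy (PySem.Int.mod (k + count + 1) 4) 0] (N - k)
          (dirx, diry, count + 1))
        (x, y, c))
      = (x ++ pvSeg dx N c m, y ++ pvSeg dy N c m, c + m) := by
  induction m with
  | zero => intro c x y; simp [pvIdx, pvSeg]
  | succ m ih =>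
    intro c x y
    rw [pvIdx_succ, List.foldl_append, ih]
    have hcnt : (c + 1 + (m : Int)) + (c + (m : Int)) = 2 * (c + 1 + (m : Int)) - 1 := by ring
    simp only [List.foldl_cons, List.foldl_nil, pvSeg, pvIdx_succ, List.flatMap_append,
      List.flatMap_cons, List.flatMap_nil, hcnt]
    refine Prod.ext ?_ (Prod.ext ?_ ?_)
    · simp [pvRep, PySem.List.pyRepeat_singleton, List.append_assoc]
    · simp [pvRep, PySem.List.pyRepeat_singleton, List.append_assoc]
    · simp; omega

-- a fold whose step ignores the element is an iterate of the step
lemma pvFoldIter {α β : Type} (g : α → α) :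
    ∀ (L : List β) (s : α), L.foldl (fun s _ => g s) s = g^[L.length] s := by
  intro L
  induction L with
  | nil => intro s; simp
  | cons b L ih => intro s; simp [ih, Function.iterate_succ_apply]

-- r steps inside a run: append r copies of the current direction, count down to 0
lemma pvRun (dx dy : List Int) (N : Int) :
    ∀ (r : Nat) (x y : List Int) (j : Int),
      (pvStep dx dy N)^[r] (x, y, j, (r : Int)) =
        (x ++ pvRep dx (PySem.Int.mod j 4) r, y ++ pvRep dy (PySem.Int.mod j 4) r, j, 0) := by
  intro r
  induction r with
  | zero => intro x y j; simp [pvRep]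
  | succ r ih =>
    intro x y j
    rw [Function.iterate_succ_apply]
    have hne : ¬((r : Int) + 1 = 0) := by omega
    have hstep : pvStep dx dy N (x, y, j, ((r + 1 : Nat) : Int)) =
        (x ++ [PySem.List.pyGetD dx (PySem.Int.mod j 4) 0],
         y ++ [PySem.List.pyGetD dy (PySem.Int.mod j 4) 0], j, (r : Int)) := by
      simp [pvStep, hne]
    rw [hstep, ih]
    simp [pvRep, List.append_assoc, List.replicate_succ]

-- one whole run from a finished state: advance, then emit its length
lemma pvNextRun (dx dy : List Int) (N : Int) (j : Int) (len : Nat)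
    (h1 : 1 ≤ len) (h2 : (len : Int) = N - PySem.Int.floordiv (j + 1 + 1) 2) :
    ∀ (x y : List Int),
      (pvStep dx dy N)^[len] (x, y, j, 0) =
        (x ++ pvRep dx (PySem.Int.mod (j + 1) 4) len,
         y ++ pvRep dy (PySem.Int.mod (j + 1) 4) len, j + 1, 0) := by
  intro x y
  obtain ⟨r, rfl⟩ : ∃ r, len = r + 1 := ⟨len - 1, by omega⟩
  rw [Function.iterate_succ_apply]
  have hstep : pvStep dx dy N (x, y, j, 0) =
      (x ++ [PySem.List.pyGetD dx (PySem.Int.mod (j + 1) 4) 0],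
       y ++ [PySem.List.pyGetD dy (PySem.Int.mod (j + 1) 4) 0], j + 1, (r : Int)) := by
    have hfd : PySem.Int.floordiv (j + 1 + 1) 2 = (j + 1 + 1) / 2 :=
      PySem.Int.floordiv_eq_ediv_of_pos (by norm_num)
    have hrem : N - (j + 1 + 1) / 2 - 1 = (r : Int) := by
      rw [← hfd, ← h2]; push_cast; ring
    simp [pvStep, hrem]
  rw [hstep, pvRun]
  simp [pvRep, List.append_assoc, List.replicate_succ]

-- step count of the run pairs for k = c+1, …, c+m (applied back to front)
def pvSteps (N : Int) : Int → Nat → Nat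
  | _, 0 => 0
  | c, m + 1 => pvSteps N (c + 1) m + ((N - (c + 1)).toNat + (N - (c + 1)).toNat)

lemma pvFloordivTwo (c : Int) : PySem.Int.floordiv (2 * c + 2) 2 = c + 1 := by
  rw [PySem.Int.floordiv_eq_ediv_of_pos (by omega)]
  omega

lemma pvFloordivTwoOdd (c : Int) : PySem.Int.floordiv (2 * c + 3) 2 = c + 1 := by
  rw [PySem.Int.floordiv_eq_ediv_of_pos (by omega)]
  omega

-- the machine consumes the pairs c+1, …, c+m and produces the segment
lemma pvPairs (dx dy : List Int) (N : Int) :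
    ∀ (m : Nat) (c : Int) (x y : List Int), 0 ≤ c → c + m ≤ N - 1 →
      (pvStep dx dy N)^[pvSteps N c m] (x, y, 2 * c, 0) =
        (x ++ pvSeg dx N c m, y ++ pvSeg dy N c m, 2 * (c + m), 0) := by
  intro m
  induction m with
  | zero => intro c x y _ _; simp [pvSteps, pvSeg, pvIdx]
  | succ m ih =>
    intro c x y hc hm
    have hlen : 1 ≤ (N - (c + 1)).toNat := by omega
    have hlen1 : ((N - (c + 1)).toNat : Int) = N - PySem.Int.floordiv (2 * c + 1 + 1) 2 := by
      rw [show (2 * c + 1 + 1) = 2 * c + 2 by ring, pvFloordivTwo]; omega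
    have hlen2 : ((N - (c + 1)).toNat : Int) = N - PySem.Int.floordiv (2 * c + 1 + 1 + 1) 2 := by
      rw [show (2 * c + 1 + 1 + 1) = 2 * c + 3 by ring, pvFloordivTwoOdd]; omega
    rw [pvSteps, Function.iterate_add_apply, Function.iterate_add_apply,
      pvNextRun dx dy N (2 * c) _ hlen hlen1,
      pvNextRun dx dy N (2 * c + 1) _ hlen hlen2]
    have h2 : 2 * c + 1 + 1 = 2 * (c + 1) := by ring
    rw [h2, ih (c + 1) _ _ (by omega) (by push_cast at hm ⊢; omega)]
    have hseg : ∀ zs : List Int, pvSeg zs N c (m + 1) =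
        (pvRep zs (PySem.Int.mod (2 * c + 1) 4) ((N - (c + 1)).toNat) ++
         pvRep zs (PySem.Int.mod (2 * (c + 1)) 4) ((N - (c + 1)).toNat)) ++ pvSeg zs N (c + 1) m := by
      intro zs
      rw [pvSeg, pvIdx_cons, List.flatMap_cons]
      have : 2 * (c + 1) - 1 = 2 * c + 1 := by ring
      rw [this]
      have hN : N - (c + 1) = ((N - (c + 1)).toNat : Int) := by omega
      rw [hN]
      rfl
    refine Prod.ext ?_ (Prod.ext ?_ ?_)
    · simp [hseg, List.append_assoc]
    · simp [hseg, List.append_assoc]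
    · simp only [Prod.mk.injEq]
      exact ⟨by push_cast; ring, by simp⟩

-- counting: the machine's N*N-1 steps are the first run plus all the pairs
lemma pvStepsVal (N : Int) :
    ∀ (m : Nat) (c : Int), 0 ≤ c → c + m ≤ N - 1 →
      (pvSteps N c m : Int) = m * (2 * N - 2 * c - m - 1) := by
  intro m
  induction m with
  | zero => intro c _ _; simp [pvSteps]
  | succ m ih =>
    intro c hc hm
    rw [pvSteps]
    push_cast [ih (c + 1) (by omega) (by push_cast at hm ⊢; omega)]
    push_cast at hm
    have : ((N - (c + 1)).toNat : Int) = N - c - 1 := by omega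
    rw [this]; ring

lemma pvTotal (N : Int) (h : 1 ≤ N) :
    (N * N - 1).toNat = pvSteps N 0 (N - 1).toNat + (N - 1).toNat := by
  have hm : (0 : Int) + ((N - 1).toNat : Int) ≤ N - 1 := by omega
  have hval := pvStepsVal N (N - 1).toNat 0 le_rfl hm
  have hcast : ((N - 1).toNat : Int) = N - 1 := by omega
  rw [hcast] at hval
  have h3 : (pvSteps N 0 (N - 1).toNat : Int) = N * N - N := by rw [hval]; ring
  have hnn : (1 : Int) ≤ N * N := by nlinarith
  generalize hg : N * N = M at h3 hnn ⊢
  omega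

lemma pvMain (dx dy : List Int) (N : Int) : make_delta dx dy N = make_delta_alt dx dy N := by
  simp only [make_delta, make_delta_alt]
  have hidx : PySem.List.pyRange 1 N 1 = pvIdx 0 (N - 1).toNat := by
    rw [PySem.List.pyRange_one]
    simp [pvIdx]
  rw [hidx, pvFoldA dx dy N (N - 1).toNat 0]
  by_cases h : 1 ≤ N
  · rw [if_pos h, pvFoldIter (pvStep dx dy N), PySem.List.length_pyRange_one]
    have hE : N * N - 1 - 0 = N * N - 1 := by ring
    rw [hE, pvTotal N h, Function.iterate_add_apply]
    have hfirst := pvRun dx dy N (N - 1).toNat ([] : List Int) ([] : List Int) 0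
    rw [show (((N - 1).toNat : Nat) : Int) = N - 1 from by omega] at hfirst
    rw [hfirst]
    simp only [List.nil_append]
    have hpairs := pvPairs dx dy N (N - 1).toNat 0
      (pvRep dx (PySem.Int.mod 0 4) (N - 1)) (pvRep dy (PySem.Int.mod 0 4) (N - 1))
      le_rfl (by omega)
    simp only [mul_zero, zero_add] at hpairs
    rw [hpairs]
    have hrepeq : ∀ zs : List Int,
        PySem.List.pyRepeat [PySem.List.pyGetD zs 0 0] (N - 1) = pvRep zs 0 (N - 1) := by
      intro zs
      rw [PySem.List.pyRepeat_singleton, pvRep]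
    simp [hrepeq]
  · rw [if_neg h]
    have hz : (N - 1).toNat = 0 := by omega
    have hrep : ∀ zs : List Int, PySem.List.pyRepeat [PySem.List.pyGetD zs 0 0] (N - 1) = [] := by
      intro zs
      rw [PySem.List.pyRepeat_singleton]
      simp; omega
    simp [hz, hrep, pvSeg, pvIdx]

-- ===== VERDICT (by name: the statement is the Claim_ definition above) =====
theorem make_delta_spec : Claim_equal_make_delta := by
  intro dx dy N _ _
  unfold Spec_make_delta
  exact pvMain dx dy N
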